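-- pv_equiv track=rewrite | github.com/tts-tcq-2024/build-safety-net-in-py-roma05c | Soundex.py | num_map
-- ===== SOURCE A (Python) =====
-- def get_soundex_code(c):
--     c = c.upper()
--     mapping = {
--         'B': '1', 'F': '1', 'P': '1', 'V': '1',
--         'C': '2', 'G': '2', 'J': '2', 'K': '2', 'Q': '2', 'S': '2', 'X': '2', 'Z': '2',
--         'D': '3', 'T': '3',
--         'L': '4',
--         'M': '5', 'N': '5',
--         'R': '6'
--     }
--     return mapping.get(c, '0')  # Default to '0' for non-mapped characters
--
-- def comparison(ch,prev_code):
--     if ch != '0' and ch != prev_code: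
--         return ch
--     else:
--         return ""
--
-- def num_map(name,prev_code):
--     soundex = ""
--     for char in name[1:]:
--         ch = get_soundex_code(char)
--         code = comparison(ch,prev_code)
--         if(code != ""):
--             soundex += code
--             prev_code = code
--     return soundex
-- ===== SOURCE B (Python) =====
-- _CODE = {c: d for d, letters in
--          (('1', 'BFPV'), ('2', 'CGJKQSXZ'), ('3', 'DT'),
--           ('4', 'L'), ('5', 'MN'), ('6', 'R'))
--          for c in letters}
--
--
-- def _run_keys(xs):
--     """One representative per run of equal adjacent elements."""
--     if not xs:
--         return []
--     head = xs[0]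
--     i = 1
--     while i < len(xs) and xs[i] == head:
--         i += 1
--     return [head] + _run_keys(xs[i:])
--
--
-- def num_map(name, prev_code):
--     kept = [d for d in (_CODE.get(c.upper(), '0') for c in name[1:]) if d != '0']
--     keys = _run_keys([prev_code] + kept)
--     return ''.join(keys[1:])
-- ===== Notes on version B (the rewrite author's own statement) =====
-- stated objective: alternative
-- what changed: Replaces A's single stateful loop (running prev_code, conditional append via the comparison helper) with a two-pass pipeline: map name[1:] to codes and drop the '0's, then collapse adjacent duplicate runs of the list seeded with prev_code (recursive run-key extraction) and join all keys but the seed.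
import Mathlib
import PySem

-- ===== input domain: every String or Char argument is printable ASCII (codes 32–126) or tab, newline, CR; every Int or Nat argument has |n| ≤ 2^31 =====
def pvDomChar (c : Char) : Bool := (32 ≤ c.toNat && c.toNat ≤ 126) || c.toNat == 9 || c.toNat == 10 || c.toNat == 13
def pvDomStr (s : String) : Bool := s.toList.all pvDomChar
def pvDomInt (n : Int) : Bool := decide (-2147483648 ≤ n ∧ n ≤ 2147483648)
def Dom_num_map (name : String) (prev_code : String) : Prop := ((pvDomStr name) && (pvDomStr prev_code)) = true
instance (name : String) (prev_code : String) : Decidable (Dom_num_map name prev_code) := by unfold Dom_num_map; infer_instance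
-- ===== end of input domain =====

-- B replaces A's stateful single loop by a two-pass pipeline (map-to-codes + drop zeros,
-- then collapse adjacent duplicate runs seeded with prev_code); objective: alternative decomposition, not faster.

-- ===== PORT A =====
def get_soundex_code (c : Char) : String :=
  let c := PySem.Chars.upperChar c
  let mapping : PySem.Dict Char String := PySem.Dict.ofList
    [('B', "1"), ('F', "1"), ('P', "1"), ('V', "1"),
     ('C', "2"), ('G', "2"), ('J', "2"), ('K', "2"), ('Q', "2"), ('S', "2"), ('X', "2"), ('Z', "2"),
     ('D', "3"), ('T', "3"),
     ('L', "4"),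
     ('M', "5"), ('N', "5"),
     ('R', "6")]
  mapping.getD c "0"

def comparison (ch : String) (prev_code : String) : String :=
  if ch ≠ "0" ∧ ch ≠ prev_code then ch else ""

-- the growing string is modelled as its character list (String.ofList at the end)
def num_map (name : String) (prev_code : String) : String :=
  let r := (PySem.Str.slice name (some 1) none).toList.foldl
    (fun (st : List Char × String) char =>
      let ch := get_soundex_code char
      let code := comparison ch st.2
      if code ≠ "" then (st.1 ++ code.toList, code) else st)
    ([], prev_code)
  String.ofList r.1

-- ===== PORT B =====
def pvCodeTable : PySem.Dict Char String := PySem.Dict.ofList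
  [('B', "1"), ('F', "1"), ('P', "1"), ('V', "1"),
   ('C', "2"), ('G', "2"), ('J', "2"), ('K', "2"), ('Q', "2"), ('S', "2"), ('X', "2"), ('Z', "2"),
   ('D', "3"), ('T', "3"),
   ('L', "4"),
   ('M', "5"), ('N', "5"),
   ('R', "6")]

def pvCode (c : Char) : String := pvCodeTable.getD (PySem.Chars.upperChar c) "0"

-- _run_keys: one representative per run of equal adjacent elements
def pvRunKeys : List String → List String
  | [] => []
  | x :: xs => x :: pvRunKeys (xs.dropWhile (· == x))
termination_by xs => xs.length
decreasing_by
  have := List.length_dropWhile_le (· == x) xs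
  simp; omega

def num_map_alt (name : String) (prev_code : String) : String :=
  let kept := ((PySem.Str.slice name (some 1) none).toList.map pvCode).filter (fun d => d != "0")
  let keys := pvRunKeys (prev_code :: kept)
  PySem.Str.join "" keys.tail

-- ===== PRECONDITION & SPEC =====
def Spec_num_map (name : String) (prev_code : String) (out : String) : Prop := out = num_map_alt name prev_code
instance (name : String) (prev_code : String) (out : String) : Decidable (Spec_num_map name prev_code out) := by unfold Spec_num_map; infer_instance

-- ===== CLAIM (what is proved, stated in full; the proofs are below) =====
def Claim_equal_num_map : Prop := ∀ (name : String) (prev_code : String), Dom_num_map name prev_code → Spec_num_map name prev_code (num_map name prev_code)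

-- ===== LEMMAS AND PROOFS =====

set_option maxHeartbeats 2000000 in
theorem pvCode_ne_empty (c : Char) : get_soundex_code c ≠ "" := by
  unfold get_soundex_code
  rcases hg : (PySem.Dict.ofList
      [('B', "1"), ('F', "1"), ('P', "1"), ('V', "1"),
       ('C', "2"), ('G', "2"), ('J', "2"), ('K', "2"), ('Q', "2"), ('S', "2"), ('X', "2"), ('Z', "2"),
       ('D', "3"), ('T', "3"), ('L', "4"), ('M', "5"), ('N', "5"), ('R', "6")] : PySem.Dict Char String).get? (PySem.Chars.upperChar c) with _ | v
  · simp only [PySem.Dict.getD, hg, Option.getD_none]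
    decide
  · simp only [PySem.Dict.getD, hg, Option.getD_some]
    have hm : (PySem.Chars.upperChar c, v) ∈ (PySem.Dict.ofList
      [('B', "1"), ('F', "1"), ('P', "1"), ('V', "1"),
       ('C', "2"), ('G', "2"), ('J', "2"), ('K', "2"), ('Q', "2"), ('S', "2"), ('X', "2"), ('Z', "2"),
       ('D', "3"), ('T', "3"), ('L', "4"), ('M', "5"), ('N', "5"), ('R', "6")] : PySem.Dict Char String).items :=
      by apply PySem.Dict.mem_items_of_get?_eq_some; exact hg
    have hitems : (PySem.Dict.ofList
      [('B', "1"), ('F', "1"), ('P', "1"), ('V', "1"),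
       ('C', "2"), ('G', "2"), ('J', "2"), ('K', "2"), ('Q', "2"), ('S', "2"), ('X', "2"), ('Z', "2"),
       ('D', "3"), ('T', "3"), ('L', "4"), ('M', "5"), ('N', "5"), ('R', "6")] : PySem.Dict Char String).items
        = [('B', "1"), ('F', "1"), ('P', "1"), ('V', "1"),
       ('C', "2"), ('G', "2"), ('J', "2"), ('K', "2"), ('Q', "2"), ('S', "2"), ('X', "2"), ('Z', "2"),
       ('D', "3"), ('T', "3"), ('L', "4"), ('M', "5"), ('N', "5"), ('R', "6")] := by rfl
    rw [hitems] at hm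
    simp only [List.mem_cons, List.not_mem_nil, or_false, Prod.mk.injEq] at hm
    rcases hm with ⟨-, rfl⟩|⟨-, rfl⟩|⟨-, rfl⟩|⟨-, rfl⟩|⟨-, rfl⟩|⟨-, rfl⟩|⟨-, rfl⟩|⟨-, rfl⟩|⟨-, rfl⟩|⟨-, rfl⟩|⟨-, rfl⟩|⟨-, rfl⟩|⟨-, rfl⟩|⟨-, rfl⟩|⟨-, rfl⟩|⟨-, rfl⟩|⟨-, rfl⟩|⟨-, rfl⟩ <;> decide

-- A's helper equals B's code function (same table, same order)
theorem code_eq (c : Char) : get_soundex_code c = pvCode c := rfl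

-- join with empty separator, cons form
set_option maxHeartbeats 2000000 in
theorem join_empty_cons (s : String) (rest : List String) :
    (PySem.Str.join "" (s :: rest)).toList = s.toList ++ (PySem.Str.join "" rest).toList := by
  cases rest with
  | nil => simp [PySem.Str.toList_join, PySem.Chars.join_singleton, PySem.Chars.join_nil]
  | cons b r => simp [PySem.Str.toList_join, PySem.Chars.join_cons_cons]

-- step function of A's loop (abbreviated for the lemmas)
def pvStepA (st : List Char × String) (char : Char) : List Char × String :=
  let ch := get_soundex_code char
  let code := comparison ch st.2
  if code ≠ "" then (st.1 ++ code.toList, code) else st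

-- step over an already-coded, zero-filtered element
def pvStepK (st : List Char × String) (d : String) : List Char × String :=
  if d ≠ st.2 then (st.1 ++ d.toList, d) else st

theorem stepA_zero (st : List Char × String) (c : Char)
    (h0 : get_soundex_code c = "0") : pvStepA st c = st := by
  simp [pvStepA, comparison, h0]

theorem stepA_prev (st : List Char × String) (c : Char)
    (hp : get_soundex_code c = st.2) : pvStepA st c = st := by
  simp [pvStepA, comparison, hp]

theorem stepA_keep (st : List Char × String) (c : Char)
    (h0 : get_soundex_code c ≠ "0") (hp : get_soundex_code c ≠ st.2) :
    pvStepA st c = (st.1 ++ (get_soundex_code c).toList, get_soundex_code c) := by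
  simp [pvStepA, comparison, h0, hp, pvCode_ne_empty c]

theorem foldA_eq_foldK (cs : List Char) (acc : List Char) (prev : String) :
    cs.foldl pvStepA (acc, prev)
      = ((cs.map pvCode).filter (fun d => d != "0")).foldl pvStepK (acc, prev) := by
  induction cs generalizing acc prev with
  | nil => rfl
  | cons c cs ih =>
    simp only [List.foldl_cons, List.map_cons, List.filter_cons, ← code_eq]
    by_cases h0 : get_soundex_code c = "0"
    · rw [stepA_zero (acc, prev) c h0, h0]
      simp only [bne_self_eq_false, Bool.false_eq_true, if_false]
      exact ih acc prev
    · have hb : (get_soundex_code c != "0") = true := by simpa [bne_iff_ne] using h0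
      rw [hb]
      simp only [if_true, List.foldl_cons]
      by_cases hp : get_soundex_code c = prev
      · rw [stepA_prev (acc, prev) c hp]
        have hk : pvStepK (acc, prev) (get_soundex_code c) = (acc, prev) := by
          simp [pvStepK, hp]
        rw [hk]
        exact ih acc prev
      · rw [stepA_keep (acc, prev) c h0 hp]
        have hk : pvStepK (acc, prev) (get_soundex_code c)
            = (acc ++ (get_soundex_code c).toList, get_soundex_code c) := by
          simp [pvStepK, hp]
        rw [hk]
        exact ih _ _

theorem foldK_eq_runKeys (kept : List String) (acc : List Char) (prev : String) :
    (kept.foldl pvStepK (acc, prev)).1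
      = acc ++ (PySem.Str.join "" (pvRunKeys (kept.dropWhile (· == prev)))).toList := by
  induction kept generalizing acc prev with
  | nil =>
    simp [pvRunKeys, PySem.Str.join, PySem.Chars.join, List.intercalate]
  | cons d ds ih =>
    by_cases h : d = prev
    · subst h
      simp only [List.foldl_cons, pvStepK, ne_eq, not_true_eq_false, if_false,
        List.dropWhile_cons, beq_self_eq_true, if_true]
      exact ih acc d
    · simp only [List.foldl_cons, pvStepK, ne_eq, not_false_iff, if_true,
        List.dropWhile_cons, beq_iff_eq, h, if_false]
      rw [ih _ d, pvRunKeys, join_empty_cons, List.append_assoc]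

theorem runKeys_tail (prev : String) (kept : List String) :
    (pvRunKeys (prev :: kept)).tail = pvRunKeys (kept.dropWhile (· == prev)) := by
  simp [pvRunKeys]

-- ===== VERDICT (by name: the statement is the Claim_ definition above) =====
set_option maxHeartbeats 2000000 in
theorem num_map_spec : Claim_equal_num_map := by
  intro name prev_code _
  show String.ofList
      (((PySem.Str.slice name (some 1) none).toList.foldl pvStepA ([], prev_code)).1)
    = PySem.Str.join ""
        (pvRunKeys (prev_code ::
          ((PySem.Str.slice name (some 1) none).toList.map pvCode).filter
            (fun d => d != "0"))).tail
  rw [foldA_eq_foldK, foldK_eq_runKeys, runKeys_tail]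
  simp only [List.nil_append]
  exact String.ofList_toList
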